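-- pv_equiv track=rewrite | github.com/dsweet99/dryer | tests/benchmark_data/module_010.py | compute_10_0
-- ===== SOURCE A (Python) =====
-- def compute_10_0(a, b, c):
--     x = a * 171 + b * 132
--     y = c * 113 - a * 74
--     for i in range(15):
--         x = x + i * 31
--         y = y - i * 11
--         if x > 6000:
--             x = x % 1500
--     return x + y + 1
-- ===== SOURCE B (Python) =====
-- def compute_10_0(a, b, c):
--     # x's modulo can fire at most once: after it x < 1500 and the remaining
--     # increments total at most 31*105 = 3255, keeping x <= 4754 < 6000.  So find
--     # the first crossing index analytically (x exceeds 6000 right after step i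
--     # iff x0 + 31*i*(i+1)//2 > 6000), apply the single modulo there, and add the
--     # rest of the arithmetic series in closed form.  y is pure closed form.
--     x0 = a * 171 + b * 132
--     if x0 + 3255 <= 6000:
--         x = x0 + 3255
--     else:
--         i = next(i for i in range(15) if x0 + 31 * i * (i + 1) // 2 > 6000)
--         t = i * (i + 1) // 2
--         x = (x0 + 31 * t) % 1500 + 31 * (105 - t)
--     return x + c * 113 - a * 74 - 1155 + 1
-- ===== Notes on version B (the rewrite author's own statement) =====
-- stated objective: alternative
-- what changed: B replaces A's 15-step accumulation of both x and y by closed forms: y is c*113-a*74-1155 directly, and for x it exploits that the modulo can fire at most once, locating the first crossing index via the triangle-number formula x0+31*i*(i+1)//2>6000, applying one modulo, and adding the remaining series in closed form.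
import Mathlib
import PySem

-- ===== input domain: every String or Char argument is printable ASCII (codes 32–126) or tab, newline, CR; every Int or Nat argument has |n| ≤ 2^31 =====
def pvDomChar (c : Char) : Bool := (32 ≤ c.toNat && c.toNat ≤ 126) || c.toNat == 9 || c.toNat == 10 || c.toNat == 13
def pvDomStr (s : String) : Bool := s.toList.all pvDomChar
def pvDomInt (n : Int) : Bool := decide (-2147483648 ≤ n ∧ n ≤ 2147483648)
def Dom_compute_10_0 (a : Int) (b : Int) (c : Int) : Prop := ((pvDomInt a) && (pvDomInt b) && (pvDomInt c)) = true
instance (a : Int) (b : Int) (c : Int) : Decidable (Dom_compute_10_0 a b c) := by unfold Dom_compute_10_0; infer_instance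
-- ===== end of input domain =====

-- B replaces A's 15-step two-accumulator loop by closed forms: y directly, and for x a
-- single-modulo analysis via the first triangle-number crossing index (objective: alternative).

-- ===== PORT A =====
def compute_10_0 (a : Int) (b : Int) (c : Int) : Int :=
  let x := a * 171 + b * 132
  let y := c * 113 - a * 74
  let r := (PySem.List.pyRange 0 15 1).foldl
    (fun (s : Int × Int) i =>
      let x := s.1 + i * 31
      let y := s.2 - i * 11
      (if x > 6000 then PySem.Int.mod x 1500 else x, y)) (x, y)
  r.1 + r.2 + 1

-- ===== PORT B =====
def compute_10_0_alt (a : Int) (b : Int) (c : Int) : Int :=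
  let x0 := a * 171 + b * 132
  let x :=
    if x0 + 3255 ≤ 6000 then x0 + 3255
    else
      -- next(i for i in range(15) if ...): the generator always yields (i = 14 qualifies),
      -- so the 'none' branch is unreachable; 0 is a mere totality default.
      match (PySem.List.pyRange 0 15 1).find?
          (fun i => decide (x0 + PySem.Int.floordiv (31 * i * (i + 1)) 2 > 6000)) with
      | some i =>
          let t := PySem.Int.floordiv (i * (i + 1)) 2
          PySem.Int.mod (x0 + 31 * t) 1500 + 31 * (105 - t)
      | none => 0
  x + c * 113 - a * 74 - 1155 + 1

-- ===== PRECONDITION & SPEC =====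
def Spec_compute_10_0 (a : Int) (b : Int) (c : Int) (out : Int) : Prop := out = compute_10_0_alt a b c
instance (a : Int) (b : Int) (c : Int) (out : Int) : Decidable (Spec_compute_10_0 a b c out) := by unfold Spec_compute_10_0; infer_instance

-- ===== CLAIM (what is proved, stated in full; the proofs are below) =====
def Claim_equal_compute_10_0 : Prop := ∀ (a : Int) (b : Int) (c : Int), Dom_compute_10_0 a b c → Spec_compute_10_0 a b c (compute_10_0 a b c)

-- ===== LEMMAS AND PROOFS =====

-- A's per-step update of x, isolated.
def pvStep (x i : Int) : Int :=
  let x := x + i * 31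
  if x > 6000 then PySem.Int.mod x 1500 else x

-- A's paired fold decomposes into the x-only fold and a subtracted series on y.
theorem pv_pair_fold (l : List Int) : ∀ (x y : Int),
    l.foldl (fun (s : Int × Int) i =>
      let x := s.1 + i * 31
      let y := s.2 - i * 11
      (if x > 6000 then PySem.Int.mod x 1500 else x, y)) (x, y)
    = (l.foldl pvStep x, y - (l.map (fun i => i * 11)).sum) := by
  induction l with
  | nil => simp
  | cons h t ih =>
      intro x y
      simp only [List.foldl_cons, List.map_cons, List.sum_cons, ih, pvStep]
      ring_nf

-- Triangle-number step identity over Int (the divisions are exact).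
theorem pv_tri (j : Int) : j * (j + 1) / 2 = (j - 1) * j / 2 + j := by
  have h : j * (j + 1) = (j - 1) * j + j * 2 := by ring
  rw [h, Int.add_mul_ediv_right _ _ (by norm_num : (2:Int) ≠ 0)]

-- While the total remaining increment keeps x at or below 6000, no modulo fires.
theorem pv_no_mod : ∀ (l : List Int) (x : Int),
    (∀ i ∈ l, (0:Int) ≤ i) → x + 31 * l.sum ≤ 6000 →
    l.foldl pvStep x = x + 31 * l.sum := by
  intro l
  induction l with
  | nil => intro x _ _; simp
  | cons h t ih =>
      intro x hpos hle
      have hh : (0:Int) ≤ h := hpos h (by simp)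
      have ht : ∀ i ∈ t, (0:Int) ≤ i := fun i hi => hpos i (by simp [hi])
      have hts : (0:Int) ≤ t.sum := List.sum_nonneg ht
      simp only [List.sum_cons] at hle
      have hcond : ¬ (x + h * 31 > 6000) := by omega
      simp only [List.foldl_cons, pvStep, if_neg hcond, List.sum_cons]
      rw [ih (x + h * 31) ht (by omega)]
      ring

-- Sum of the remaining range, in closed form.
theorem pv_sum : ∀ (n j : Nat), j + n = 15 →
    (PySem.List.pyRange (j:Int) 15 1).sum = 105 - ((j:Int) - 1) * (j:Int) / 2 := by
  intro n
  induction n with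
  | zero =>
      intro j hj
      have : j = 15 := by omega
      subst this
      norm_num [PySem.List.pyRange_one_eq_nil]
  | succ n ih =>
      intro j hj
      have hlt : (j:Int) < 15 := by exact_mod_cast (by omega : j < 15)
      rw [PySem.List.pyRange_one_cons hlt, List.sum_cons]
      have h1 := ih (j + 1) (by omega)
      push_cast at h1
      rw [h1, add_sub_cancel_right]
      have h2 := pv_tri (j:Int)
      omega

theorem pv_mem_nonneg (j : Nat) (i : Int) (hi : i ∈ PySem.List.pyRange (j:Int) 15 1) :
    (0:Int) ≤ i := by
  have := (PySem.List.mem_pyRange_one).1 hi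
  omega

-- B's closed-form output as a function of the crossing search's result.
def pvOut (x0 : Int) : Option Int → Int
  | some i =>
      PySem.Int.mod (x0 + 31 * PySem.Int.floordiv (i * (i + 1)) 2) 1500
        + 31 * (105 - PySem.Int.floordiv (i * (i + 1)) 2)
  | none => 0

-- The crossing analysis: starting at x0 + 31*T(j-1), with no crossing before j, the
-- rest of A's fold equals B's single-modulo closed form over the first crossing index.
theorem pv_cross : ∀ (n j : Nat), j + n = 15 → ∀ x0 s : Int,
    6000 < x0 + 3255 →
    (j = 0 ∨ x0 + 31 * (((j:Int) - 1) * (j:Int) / 2) ≤ 6000) →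
    s = x0 + 31 * (((j:Int) - 1) * (j:Int) / 2) →
    (PySem.List.pyRange (j:Int) 15 1).foldl pvStep s =
      pvOut x0 ((PySem.List.pyRange (j:Int) 15 1).find?
        (fun i => decide (x0 + PySem.Int.floordiv (31 * i * (i + 1)) 2 > 6000))) := by
  intro n
  induction n with
  | zero =>
      intro j hj x0 s hbig hno hs
      have : j = 15 := by omega
      subst this
      rcases hno with h | h
      · omega
      · exfalso
        have h15 : ((15:Nat):Int) = 15 := by norm_num
        rw [h15] at h
        norm_num at h
        omega
  | succ n ih =>
      intro j hj x0 s hbig hno hs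
      subst hs
      have hj0 : (0:Int) ≤ (j:Int) := Int.natCast_nonneg j
      have hj1 : (0:Int) ≤ (j:Int) + 1 := by omega
      have hlt : (j:Int) < 15 := by exact_mod_cast (by omega : j < 15)
      have hfd : ∀ i : Int, 0 ≤ i →
          PySem.Int.floordiv (31 * i * (i + 1)) 2 = 31 * (i * (i + 1) / 2) := by
        intro i hi
        rw [PySem.Int.floordiv_eq_ediv_of_pos (by norm_num)]
        have hdvd : (2:Int) ∣ i * (i + 1) := (Int.even_mul_succ_self i).two_dvd
        rw [mul_assoc, Int.mul_ediv_assoc 31 hdvd]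
      have hfd2 : ∀ i : Int, PySem.Int.floordiv (i * (i + 1)) 2 = i * (i + 1) / 2 := by
        intro i; rw [PySem.Int.floordiv_eq_ediv_of_pos (by norm_num)]
      rw [PySem.List.pyRange_one_cons hlt, List.foldl_cons]
      have hstep : pvStep (x0 + 31 * (((j:Int) - 1) * (j:Int) / 2)) (j:Int)
          = if x0 + 31 * ((j:Int) * ((j:Int) + 1) / 2) > 6000
            then PySem.Int.mod (x0 + 31 * ((j:Int) * ((j:Int) + 1) / 2)) 1500
            else x0 + 31 * ((j:Int) * ((j:Int) + 1) / 2) := by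
        simp only [pvStep, pv_tri]
        ring_nf
      by_cases hP : x0 + 31 * ((j:Int) * ((j:Int) + 1) / 2) > 6000
      · -- crossing happens exactly at j
        have hPf : (fun i => decide (x0 + PySem.Int.floordiv (31 * i * (i + 1)) 2 > 6000)) (j:Int) = true := by
          show decide (x0 + PySem.Int.floordiv (31 * (j:Int) * ((j:Int) + 1)) 2 > 6000) = true
          rw [hfd (j:Int) hj0]
          exact decide_eq_true hP
        rw [hstep, if_pos hP,
          List.find?_cons_of_pos (p := fun i => decide (x0 + PySem.Int.floordiv (31 * i * (i + 1)) 2 > 6000)) hPf]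
        have hmod_lb : 0 ≤ PySem.Int.mod (x0 + 31 * ((j:Int) * ((j:Int) + 1) / 2)) 1500 := by
          rw [PySem.Int.mod_eq_emod_of_pos (by norm_num)]
          exact Int.emod_nonneg _ (by norm_num)
        have hmod_ub : PySem.Int.mod (x0 + 31 * ((j:Int) * ((j:Int) + 1) / 2)) 1500 < 1500 := by
          rw [PySem.Int.mod_eq_emod_of_pos (by norm_num)]
          exact Int.emod_lt_of_pos _ (by norm_num)
        have htail_sum : (PySem.List.pyRange ((j:Int) + 1) 15 1).sum
            = 105 - (j:Int) * ((j:Int) + 1) / 2 := by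
          have h1 := pv_sum n (j + 1) (by omega)
          push_cast at h1
          rw [h1, add_sub_cancel_right]
        have htn : 0 ≤ (j:Int) * ((j:Int) + 1) / 2 :=
          Int.ediv_nonneg (mul_nonneg hj0 hj1) (by norm_num)
        have hnn : (0:Int) ≤ (PySem.List.pyRange ((j:Int) + 1) 15 1).sum := by
          apply List.sum_nonneg
          intro i hi
          refine pv_mem_nonneg (j + 1) i ?_
          push_cast
          exact hi
        have htub : (j:Int) * ((j:Int) + 1) / 2 ≤ 105 := by omega
        have htail := pv_no_mod (PySem.List.pyRange ((j:Int) + 1) 15 1)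
          (PySem.Int.mod (x0 + 31 * ((j:Int) * ((j:Int) + 1) / 2)) 1500)
          (by intro i hi
              refine pv_mem_nonneg (j + 1) i ?_
              push_cast
              exact hi)
          (by rw [htail_sum]; omega)
        rw [htail, htail_sum]
        simp only [pvOut, hfd2]
      · -- no crossing at j: recurse
        have hPf : (fun i => decide (x0 + PySem.Int.floordiv (31 * i * (i + 1)) 2 > 6000)) (j:Int) = false := by
          show decide (x0 + PySem.Int.floordiv (31 * (j:Int) * ((j:Int) + 1)) 2 > 6000) = false
          rw [hfd (j:Int) hj0]
          exact decide_eq_false hP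
        rw [hstep, if_neg hP,
          List.find?_cons_of_neg (p := fun i => decide (x0 + PySem.Int.floordiv (31 * i * (i + 1)) 2 > 6000)) (by rw [hPf]; exact Bool.false_ne_true)]
        have h1 := ih (j + 1) (by omega) x0 (x0 + 31 * ((j:Int) * ((j:Int) + 1) / 2)) hbig
          (Or.inr (by push_cast; rw [add_sub_cancel_right]; omega))
          (by push_cast; rw [add_sub_cancel_right])
        push_cast at h1
        exact h1

-- ===== VERDICT (by name: the statement is the Claim_ definition above) =====
theorem compute_10_0_spec : Claim_equal_compute_10_0 := by
  intro a b c _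
  simp only [Spec_compute_10_0, compute_10_0, compute_10_0_alt, pv_pair_fold]
  have hy : ((PySem.List.pyRange 0 15 1).map (fun i => i * 11)).sum = 1155 := by decide
  rw [hy]
  by_cases h : a * 171 + b * 132 + 3255 ≤ 6000
  · rw [if_pos h]
    have hsum : (PySem.List.pyRange 0 15 1).sum = 105 := by decide
    have hnm := pv_no_mod (PySem.List.pyRange 0 15 1) (a * 171 + b * 132)
      (by intro i hi; exact pv_mem_nonneg 0 i (by exact_mod_cast hi))
      (by rw [hsum]; omega)
    rw [hsum] at hnm
    rw [hnm]
    ring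
  · rw [if_neg h]
    have hc := pv_cross 15 0 (by norm_num) (a * 171 + b * 132) (a * 171 + b * 132)
      (by omega) (Or.inl rfl) (by norm_num)
    simp only [Nat.cast_zero] at hc
    rw [hc]
    generalize (PySem.List.pyRange 0 15 1).find?
        (fun i => decide (a * 171 + b * 132 + PySem.Int.floordiv (31 * i * (i + 1)) 2 > 6000)) = o
    cases o with
    | none => simp only [pvOut]; ring
    | some i => simp only [pvOut]; ring
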